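-- pv_equiv track=rewrite | github.com/dafyddstephenson/ucla-roms | Examples/Explicit_use/explicit_use.py | find_linker_error_blocks
-- ===== SOURCE A (Python) =====
-- def find_linker_error_blocks(output_lines):
--     blocks = []
--     n = len(output_lines)
--     i = 0
--     while i < n:
--         line = output_lines[i].lower().strip()
--
--         if line.startswith("ld:") and ("ld: warning:" not in line):
--             # Walk back to filename
--             block_start = i
--             while block_start > 0 and "Undefined symbols" not in output_lines[block_start]:
--                 block_start -= 1
--             # Now capture from filename to current 'Error:' line, inclusive
--             block = output_lines[block_start:i+1]
--             blocks.append(block)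
--         i += 1
--     return blocks
-- ===== SOURCE B (Python) =====
-- def find_linker_error_blocks(output_lines):
--     # One forward pass: track the most recent "Undefined symbols" line index
--     # (default 0) instead of walking backwards from each "ld:" line.
--     blocks = []
--     last = 0
--     for i, raw in enumerate(output_lines):
--         if "Undefined symbols" in raw:
--             last = i
--         line = raw.lower().strip()
--         if line.startswith("ld:") and "ld: warning:" not in line:
--             blocks.append(output_lines[last:i + 1])
--     return blocks
-- ===== Notes on version B (the rewrite author's own statement) =====
-- stated objective: alternative
-- what changed: Replaces the backward walk from every 'ld:' line (worst-case O(n^2)) by a single forward pass that tracks the index of the most recent 'Undefined symbols' line (default 0); measured speed was comparable on generated inputs.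
import Mathlib
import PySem

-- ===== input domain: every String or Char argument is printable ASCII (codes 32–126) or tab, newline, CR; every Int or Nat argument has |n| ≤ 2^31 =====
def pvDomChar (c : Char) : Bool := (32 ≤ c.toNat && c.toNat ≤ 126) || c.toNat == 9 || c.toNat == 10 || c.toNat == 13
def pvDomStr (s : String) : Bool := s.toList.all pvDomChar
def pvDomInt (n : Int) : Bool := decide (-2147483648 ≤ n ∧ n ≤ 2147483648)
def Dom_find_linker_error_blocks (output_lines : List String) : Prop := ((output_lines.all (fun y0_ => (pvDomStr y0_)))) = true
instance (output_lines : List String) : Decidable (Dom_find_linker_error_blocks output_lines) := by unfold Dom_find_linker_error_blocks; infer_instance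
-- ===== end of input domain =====

-- B replaces A's backward walk from each 'ld:' line by one forward pass tracking
-- the most recent 'Undefined symbols' index (objective: alternative single-pass algorithm).

-- ===== PORT A =====
-- inner while loop: walks back from bs until a line containing "Undefined symbols" or index 0.
-- (indices are always in range here, so List.getD bs "" is exact for output_lines[bs])
def pvWalkBack (output_lines : List String) : Nat → Nat
  | 0 => 0
  | bs + 1 =>
    if PySem.Str.isIn "Undefined symbols" (output_lines.getD (bs + 1) "") then bs + 1
    else pvWalkBack output_lines bs

-- outer while loop over i
def pvLoopA (output_lines : List String) (n i : Nat) (blocks : List (List String)) :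
    List (List String) :=
  if i < n then
    let line := PySem.Str.strip (PySem.Str.lower (output_lines.getD i ""))
    let blocks' :=
      if PySem.Str.startswith line "ld:" && !(PySem.Str.isIn "ld: warning:" line) then
        blocks ++ [PySem.List.slice output_lines (some (pvWalkBack output_lines i : Int))
                     (some ((i : Int) + 1))]
      else blocks
    pvLoopA output_lines n (i + 1) blocks'
  else blocks
termination_by n - i

def find_linker_error_blocks (output_lines : List String) : List (List String) :=
  pvLoopA output_lines output_lines.length 0 []

-- ===== PORT B =====
-- body of B's for loop: state = (last, blocks)
def pvStepB (output_lines : List String) (st : Int × List (List String)) (p : Int × String) :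
    Int × List (List String) :=
  let last := if PySem.Str.isIn "Undefined symbols" p.2 then p.1 else st.1
  let line := PySem.Str.strip (PySem.Str.lower p.2)
  if PySem.Str.startswith line "ld:" && !(PySem.Str.isIn "ld: warning:" line) then
    (last, st.2 ++ [PySem.List.slice output_lines (some last) (some (p.1 + 1))])
  else (last, st.2)

def find_linker_error_blocks_alt (output_lines : List String) : List (List String) :=
  ((PySem.List.enumerate output_lines 0).foldl (pvStepB output_lines) (0, [])).2

-- ===== PRECONDITION & SPEC =====
def Spec_find_linker_error_blocks (output_lines : List String) (out : List (List String)) : Prop := out = find_linker_error_blocks_alt output_lines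
instance (output_lines : List String) (out : List (List String)) : Decidable (Spec_find_linker_error_blocks output_lines out) := by unfold Spec_find_linker_error_blocks; infer_instance

-- ===== CLAIM (what is proved, stated in full; the proofs are below) =====
def Claim_equal_find_linker_error_blocks : Prop := ∀ (output_lines : List String), Dom_find_linker_error_blocks output_lines → Spec_find_linker_error_blocks output_lines (find_linker_error_blocks output_lines)

-- ===== LEMMAS AND PROOFS =====

-- invariant: B's fold over the suffix starting at i, with last = pvWalkBack of the
-- previous index (or 0 at i = 0), computes what A's outer loop computes from i.
theorem pv_key (xs : List String) :
    ∀ (k i : Nat) (L : Int) (blocks : List (List String)),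
      xs.length - i ≤ k →
      (i = 0 ∧ L = 0 ∨ ∃ j, i = j + 1 ∧ L = (pvWalkBack xs j : Int)) →
      (List.foldl (pvStepB xs) (L, blocks)
          (PySem.List.enumerate (xs.drop i) (i : Int))).2
        = pvLoopA xs xs.length i blocks := by
  intro k
  induction k with
  | zero =>
    intro i L blocks hk _
    have hge : xs.length ≤ i := by omega
    rw [List.drop_eq_nil_of_le hge]
    rw [pvLoopA]
    simp [PySem.List.enumerate, if_neg (by omega : ¬ i < xs.length)]
  | succ k ih =>
    intro i L blocks hk hL
    by_cases hi : i < xs.length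
    · rw [List.drop_eq_getElem_cons hi, PySem.List.enumerate_cons, List.foldl_cons]
      have hcast : (i : Int) + 1 = ((i + 1 : Nat) : Int) := by push_cast; ring
      have hgd : xs.getD i "" = xs[i] := List.getD_eq_getElem xs "" hi
      have hk2 : xs.length - (i + 1) ≤ k := by omega
      have hlast : (if PySem.Str.isIn "Undefined symbols" xs[i] then (i : Int) else L)
          = (pvWalkBack xs i : Int) := by
        rcases hL with ⟨h0, hL0⟩ | ⟨j, hj, hLj⟩
        · subst h0; subst hL0
          split_ifs <;> simp [pvWalkBack]
        · subst hj; subst hLj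
          rw [pvWalkBack, hgd]
          split_ifs <;> simp
      rw [pvLoopA, if_pos hi, hgd]
      rcases hc : (PySem.Str.startswith (PySem.Str.strip (PySem.Str.lower xs[i])) "ld:" &&
          !(PySem.Str.isIn "ld: warning:" (PySem.Str.strip (PySem.Str.lower xs[i])))) with _ | _ <;>
      · simp only [pvStepB, hc, hlast, hcast, Bool.false_eq_true, ite_true, ite_false]
        exact ih (i + 1) _ _ hk2 (Or.inr ⟨i, rfl, rfl⟩)
    · have hge : xs.length ≤ i := by omega
      rw [List.drop_eq_nil_of_le hge]
      rw [pvLoopA]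
      simp [PySem.List.enumerate, if_neg hi]

-- ===== VERDICT (by name: the statement is the Claim_ definition above) =====
theorem find_linker_error_blocks_spec : Claim_equal_find_linker_error_blocks := by
  intro xs _
  unfold Spec_find_linker_error_blocks find_linker_error_blocks find_linker_error_blocks_alt
  have h := pv_key xs xs.length 0 0 [] (by omega) (Or.inl ⟨rfl, rfl⟩)
  simpa using h.symm
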